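-- pv_equiv track=rewrite | github.com/onerain92/algorithm | Baekjoon/블랙잭.py | solution
-- ===== SOURCE A (Python) =====
-- import itertools
--
-- def solution(card_num, max_num, cards):
--     all_cases = itertools.combinations(cards, 3)
--     max_sum = 0
--
--     for case in all_cases:
--         case_sum = sum(case)
--         if case_sum <= max_num and case_sum > max_sum:
--             max_sum = case_sum
--
--     return max_sum
-- ===== SOURCE B (Python) =====
-- def solution(card_num, max_num, cards):
--     best = 0
--     singles = []
--     pair_sums = []
--     for z in cards:
--         for p in pair_sums:
--             s = p + z
--             if s <= max_num and s > best:
--                 best = s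
--         for x in singles:
--             pair_sums.append(x + z)
--         singles.append(z)
--     return best
-- ===== Notes on version B (the rewrite author's own statement) =====
-- stated objective: alternative
-- what changed: Replaces itertools 3-combination enumeration (tuple build + sum() per triple) with a single left-to-right pass that incrementally maintains the list of pair sums of the prefix and combines each new card with those precomputed pair sums.
import Mathlib
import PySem

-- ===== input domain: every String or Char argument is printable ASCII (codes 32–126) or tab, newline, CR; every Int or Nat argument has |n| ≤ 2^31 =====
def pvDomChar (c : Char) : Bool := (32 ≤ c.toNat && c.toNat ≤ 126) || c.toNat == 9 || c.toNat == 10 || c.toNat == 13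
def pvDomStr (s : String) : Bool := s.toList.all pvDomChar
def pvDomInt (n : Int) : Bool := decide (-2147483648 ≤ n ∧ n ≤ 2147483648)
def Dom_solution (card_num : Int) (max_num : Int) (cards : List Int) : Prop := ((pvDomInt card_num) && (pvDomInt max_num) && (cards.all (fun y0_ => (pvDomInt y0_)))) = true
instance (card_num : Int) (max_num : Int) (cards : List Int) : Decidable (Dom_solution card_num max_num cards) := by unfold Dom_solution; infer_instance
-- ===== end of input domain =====

-- B replaces the itertools 3-combination enumeration by a single pass that incrementally maintains the pair sums of the prefix (alternative structure, same asymptotic cost).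

-- ===== PORT A =====
-- itertools.combinations(cards, 2) / (cards, 3), in itertools order
def combos2 : List Int → List (Int × Int)
  | [] => []
  | x :: xs => (xs.map (fun y => (x, y))) ++ combos2 xs

def combos3 : List Int → List (Int × Int × Int)
  | [] => []
  | x :: xs => ((combos2 xs).map (fun p => (x, p.1, p.2))) ++ combos3 xs

def solution (card_num : Int) (max_num : Int) (cards : List Int) : Int :=
  (combos3 cards).foldl
    (fun max_sum c =>
      let case_sum := c.1 + c.2.1 + c.2.2
      if case_sum ≤ max_num ∧ case_sum > max_sum then case_sum else max_sum) 0

-- ===== PORT B =====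
-- state = (best, singles, pair_sums); one step of B's outer loop over a card z
def bstep (max_num : Int) (st : Int × List Int × List Int) (z : Int) : Int × List Int × List Int :=
  let best := st.2.2.foldl
    (fun best p =>
      let s := p + z
      if s ≤ max_num ∧ s > best then s else best) st.1
  (best, st.2.1 ++ [z], st.2.2 ++ st.2.1.map (fun x => x + z))

def solution_alt (card_num : Int) (max_num : Int) (cards : List Int) : Int :=
  (cards.foldl (bstep max_num) (0, [], [])).1

-- ===== PRECONDITION & SPEC =====
def Spec_solution (card_num : Int) (max_num : Int) (cards : List Int) (out : Int) : Prop := out = solution_alt card_num max_num cards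
instance (card_num : Int) (max_num : Int) (cards : List Int) (out : Int) : Decidable (Spec_solution card_num max_num cards out) := by unfold Spec_solution; infer_instance

-- ===== CLAIM (what is proved, stated in full; the proofs are below) =====
def Claim_equal_solution : Prop := ∀ (card_num : Int) (max_num : Int) (cards : List Int), Dom_solution card_num max_num cards → Spec_solution card_num max_num cards (solution card_num max_num cards)

-- ===== LEMMAS AND PROOFS =====

-- the common fold step: keep max_sum, replacing it by a sum s when s ≤ M and s is bigger
def g (M m s : Int) : Int := if s ≤ M ∧ s > m then s else m

lemma g_comm (M m a b : Int) : g M (g M m a) b = g M (g M m b) a := by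
  simp only [g]; split_ifs <;> omega

-- triple sums / pair sums of a list
def ts (l : List Int) : List Int := (combos3 l).map (fun c => c.1 + c.2.1 + c.2.2)
def ps (l : List Int) : List Int := (combos2 l).map (fun p => p.1 + p.2)

lemma combos2_append (l : List Int) (z : Int) :
    (↑(combos2 (l ++ [z])) : Multiset (Int × Int)) = ↑(combos2 l) + ↑(l.map (fun y => (y, z))) := by
  induction l with
  | nil => simp [combos2]
  | cons x l ih =>
    show (↑((((l ++ [z]).map (fun y => (x, y))) ++ combos2 (l ++ [z]))) : Multiset (Int × Int)) = _
    simp only [combos2, List.map_append, List.map_cons, List.map_nil, ← Multiset.coe_add, ih,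
      ← Multiset.cons_coe, ← Multiset.singleton_add]
    abel

lemma combos3_append (l : List Int) (z : Int) :
    (↑(combos3 (l ++ [z])) : Multiset (Int × Int × Int)) =
      ↑(combos3 l) + ↑((combos2 l).map (fun p => (p.1, p.2, z))) := by
  induction l with
  | nil => simp [combos3, combos2]
  | cons x l ih =>
    show (↑(((combos2 (l ++ [z])).map (fun p => (x, p.1, p.2))) ++ combos3 (l ++ [z])) : Multiset (Int × Int × Int)) = _
    simp only [combos3, combos2, List.map_append, List.map_map, ← Multiset.coe_add, ih,
      ← Multiset.map_coe, combos2_append, Multiset.map_add, Multiset.map_map, Function.comp_def]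
    abel

lemma ps_append (l : List Int) (z : Int) :
    (↑(ps (l ++ [z])) : Multiset Int) = ↑(ps l) + ↑(l.map (fun x => x + z)) := by
  simp only [ps, ← Multiset.map_coe, combos2_append, Multiset.map_add, Multiset.map_map,
    Function.comp_def]

lemma ts_append (l : List Int) (z : Int) :
    (↑(ts (l ++ [z])) : Multiset Int) = ↑(ts l) + ↑((ps l).map (fun p => p + z)) := by
  simp only [ts, ps, List.map_map, ← Multiset.map_coe, combos3_append, Multiset.map_add,
    Multiset.map_map, Function.comp_def]

lemma foldl_g_perm (M : Int) {l₁ l₂ : List Int} (h : l₁.Perm l₂) (i : Int) :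
    l₁.foldl (g M) i = l₂.foldl (g M) i := by
  haveI : RightCommutative (g M) := ⟨fun m a b => g_comm M m a b⟩
  exact h.foldl_eq i

-- the loop invariant of B's single pass
lemma inv (M : Int) (l : List Int) :
    (l.foldl (bstep M) (0, [], [])).2.1 = l ∧
    (↑(l.foldl (bstep M) (0, [], [])).2.2 : Multiset Int) = ↑(ps l) ∧
    (l.foldl (bstep M) (0, [], [])).1 = (ts l).foldl (g M) 0 := by
  induction l using List.reverseRecOn with
  | nil => exact ⟨rfl, rfl, rfl⟩
  | append_singleton l z ih =>
    obtain ⟨h1, h2, h3⟩ := ih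
    rw [List.foldl_append]
    refine ⟨by simp [bstep, h1], ?_, ?_⟩
    · show (↑((l.foldl (bstep M) (0, [], [])).2.2 ++ (l.foldl (bstep M) (0, [], [])).2.1.map (fun x => x + z)) : Multiset Int) = _
      rw [← Multiset.coe_add, h1, h2, ps_append]
    · show (l.foldl (bstep M) (0, [], [])).2.2.foldl
          (fun best p => let s := p + z; if s ≤ M ∧ s > best then s else best)
          (l.foldl (bstep M) (0, [], [])).1 = (ts (l ++ [z])).foldl (g M) 0
      have hperm : ((l.foldl (bstep M) (0, [], [])).2.2.map (fun p => p + z)).Perm ((ps l).map (fun p => p + z)) :=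
        ((Multiset.coe_eq_coe).1 h2).map _
      calc (l.foldl (bstep M) (0, [], [])).2.2.foldl
            (fun best p => let s := p + z; if s ≤ M ∧ s > best then s else best)
            (l.foldl (bstep M) (0, [], [])).1
          = ((l.foldl (bstep M) (0, [], [])).2.2.map (fun p => p + z)).foldl (g M)
            (l.foldl (bstep M) (0, [], [])).1 := by rw [List.foldl_map]; rfl
        _ = ((ps l).map (fun p => p + z)).foldl (g M) (l.foldl (bstep M) (0, [], [])).1 :=
            foldl_g_perm M hperm _
        _ = ((ps l).map (fun p => p + z)).foldl (g M) ((ts l).foldl (g M) 0) := by rw [h3]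
        _ = (ts l ++ (ps l).map (fun p => p + z)).foldl (g M) 0 := (List.foldl_append).symm
        _ = (ts (l ++ [z])).foldl (g M) 0 :=
            (foldl_g_perm M ((Multiset.coe_eq_coe).1 (ts_append l z)) 0).symm

lemma solution_eq_fold (card_num max_num : Int) (cards : List Int) :
    solution card_num max_num cards = (ts cards).foldl (g max_num) 0 := by
  simp [solution, ts, List.foldl_map, g]

-- ===== VERDICT (by name: the statement is the Claim_ definition above) =====
theorem solution_spec : Claim_equal_solution := by
  intro card_num max_num cards _
  show solution card_num max_num cards = solution_alt card_num max_num cards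
  rw [solution_eq_fold, solution_alt, (inv max_num cards).2.2]
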